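-- pv_equiv track=rewrite | github.com/drojjin-cave/roza-bot | moduls/utils/google_sheet/GoogleSheet.py | search_data_cell
-- ===== SOURCE A (Python) =====
-- def search_data_cell(search_word, data):
--     """Находит ячейку первого вхождения слова в таблицу"""
--     res = ''
--     for i, rows in enumerate(data):
--         for j, word in enumerate(rows):
--             if search_word == word:
--                 res = chr(ord('A') + j) + str(i + 1)
--                 break
--         if res:
--             break
--     return res
-- ===== SOURCE B (Python) =====
-- def search_data_cell(search_word, data):
--     """Builds a first-occurrence word->address index in one row-major pass, then looks up."""
--     index = {}
--     for i, rows in enumerate(data):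
--         for j, word in enumerate(rows):
--             if word not in index:
--                 index[word] = chr(ord('A') + j) + str(i + 1)
--     return index.get(search_word, '')
-- ===== Notes on version B (the rewrite author's own statement) =====
-- stated objective: alternative
-- what changed: B replaces A's early-exit nested scan with a single full row-major pass that builds a first-occurrence word->address dictionary and then answers by one lookup with '' as the miss default.
import Mathlib
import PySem

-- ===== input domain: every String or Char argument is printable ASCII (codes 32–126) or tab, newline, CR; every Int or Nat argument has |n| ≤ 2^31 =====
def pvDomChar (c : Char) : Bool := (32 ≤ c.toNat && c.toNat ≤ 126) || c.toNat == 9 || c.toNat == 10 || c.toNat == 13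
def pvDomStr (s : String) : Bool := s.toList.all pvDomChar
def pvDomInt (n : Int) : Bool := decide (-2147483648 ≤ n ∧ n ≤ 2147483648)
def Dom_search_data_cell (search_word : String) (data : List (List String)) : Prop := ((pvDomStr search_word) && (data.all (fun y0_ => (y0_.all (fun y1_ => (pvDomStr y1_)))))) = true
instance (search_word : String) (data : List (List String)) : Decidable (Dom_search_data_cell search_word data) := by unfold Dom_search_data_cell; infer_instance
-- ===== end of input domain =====

-- B replaces A's early-exit nested scan by one full row-major pass building a
-- first-occurrence word->address dictionary, answered by a single lookup (alternative decomposition, same cost).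


-- ===== PORT A =====
-- chr(ord('A') + j) + str(i + 1), concatenation done over List Char (exact on this domain)
def pvAddr (j i : Nat) : String :=
  String.ofList (Char.ofNat ('A'.toNat + j) :: (PySem.Int.toStr ((i : Int) + 1)).toList)

-- inner 'for j, word in enumerate(rows)' with break: res is set to the address at the first match
def pvInnerA (sw : String) (i : Nat) : Nat → List String → String
  | _, [] => ""
  | j, w :: ws => if sw = w then pvAddr j i else pvInnerA sw i (j + 1) ws

-- outer 'for i, rows in enumerate(data)' with 'if res: break'
def pvOuterA (sw : String) : Nat → List (List String) → String
  | _, [] => ""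
  | i, rows :: rest =>
    let res := pvInnerA sw i 0 rows
    if res = "" then pvOuterA sw (i + 1) rest else res

def search_data_cell (search_word : String) (data : List (List String)) : String :=
  pvOuterA search_word 0 data

-- ===== PORT B =====
-- 'if word not in index: index[word] = chr(ord('A')+j)+str(i+1)' over one row
def pvIndexRow (i : Nat) : PySem.Dict String String → Nat → List String → PySem.Dict String String
  | d, _, [] => d
  | d, j, w :: ws =>
    pvIndexRow i (if d.contains w then d else d.insert w (pvAddr j i)) (j + 1) ws

-- the full row-major pass over the table
def pvIndexAll : PySem.Dict String String → Nat → List (List String) → PySem.Dict String String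
  | d, _, [] => d
  | d, i, rows :: rest => pvIndexAll (pvIndexRow i d 0 rows) (i + 1) rest

def search_data_cell_alt (search_word : String) (data : List (List String)) : String :=
  (pvIndexAll PySem.Dict.empty 0 data).getD search_word ""

-- ===== PRECONDITION & SPEC =====
def Spec_search_data_cell (search_word : String) (data : List (List String)) (out : String) : Prop := out = search_data_cell_alt search_word data
instance (search_word : String) (data : List (List String)) (out : String) : Decidable (Spec_search_data_cell search_word data out) := by unfold Spec_search_data_cell; infer_instance

-- ===== CLAIM (what is proved, stated in full; the proofs are below) =====
def Claim_equal_search_data_cell : Prop := ∀ (search_word : String) (data : List (List String)), Dom_search_data_cell search_word data → Spec_search_data_cell search_word data (search_data_cell search_word data)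

-- ===== LEMMAS AND PROOFS =====

theorem pvAddr_ne_empty (j i : Nat) : pvAddr j i ≠ "" := by
  intro h
  have := congrArg String.toList h
  simp [pvAddr] at this

-- A's inner scan returns "" exactly when sw is not in the row
theorem pvInnerA_eq_empty_iff (sw : String) (i : Nat) :
    ∀ (ws : List String) (j : Nat), pvInnerA sw i j ws = "" ↔ sw ∉ ws := by
  intro ws
  induction ws with
  | nil => intro j; simp [pvInnerA]
  | cons w ws ih =>
    intro j
    by_cases h : sw = w
    · simp [pvInnerA, h, pvAddr_ne_empty]
    · simp [pvInnerA, h, ih]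

-- contains after a row pass
theorem pvIndexRow_contains (i : Nat) (sw : String) :
    ∀ (ws : List String) (d : PySem.Dict String String) (j : Nat),
      (pvIndexRow i d j ws).contains sw = (d.contains sw || decide (sw ∈ ws)) := by
  intro ws
  induction ws with
  | nil => intro d j; simp [pvIndexRow]
  | cons w ws ih =>
    intro d j
    by_cases hc : d.contains w
    · rw [pvIndexRow, if_pos hc, ih]
      by_cases hsw : sw = w
      · subst hsw; simp [hc]
      · simp [hsw]
    · rw [pvIndexRow, if_neg hc, ih, PySem.Dict.contains_insert]
      by_cases hsw : sw = w
      · subst hsw; simp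
      · have hb : (sw == w) = false := by simp [hsw]
        simp [hsw, hb]

-- lookup after a row pass: an existing binding survives; otherwise the row's first match wins
theorem pvIndexRow_getD (i : Nat) (sw : String) :
    ∀ (ws : List String) (d : PySem.Dict String String) (j : Nat),
      (pvIndexRow i d j ws).getD sw "" =
        if d.contains sw then d.getD sw "" else pvInnerA sw i j ws := by
  intro ws
  induction ws with
  | nil =>
    intro d j
    by_cases h : d.contains sw
    · simp [pvIndexRow, h]
    · have h' : d.contains sw = false := by simpa using h
      simp [pvIndexRow, pvInnerA, h, PySem.Dict.getD_of_not_contains d "" h']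
  | cons w ws ih =>
    intro d j
    by_cases hc : d.contains w
    · rw [pvIndexRow, if_pos hc, ih]
      by_cases hsw : d.contains sw
      · simp [hsw]
      · have hne : sw ≠ w := by intro h; subst h; exact hsw hc
        simp [hsw, pvInnerA, hne]
    · rw [pvIndexRow, if_neg hc, ih]
      by_cases hsw : sw = w
      · subst hsw
        simp [PySem.Dict.contains_insert, hc, PySem.Dict.getD_insert, pvInnerA]
      · simp [PySem.Dict.contains_insert, hsw, PySem.Dict.getD_insert, pvInnerA]

-- lookup after the full pass: an existing binding survives; otherwise A's remaining scan
theorem pvIndexAll_getD (sw : String) :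
    ∀ (rest : List (List String)) (d : PySem.Dict String String) (i : Nat),
      (pvIndexAll d i rest).getD sw "" =
        if d.contains sw then d.getD sw "" else pvOuterA sw i rest := by
  intro rest
  induction rest with
  | nil =>
    intro d i
    by_cases h : d.contains sw
    · simp [pvIndexAll, h]
    · have h' : d.contains sw = false := by simpa using h
      simp [pvIndexAll, pvOuterA, h, PySem.Dict.getD_of_not_contains d "" h']
  | cons rows rest ih =>
    intro d i
    rw [pvIndexAll, ih, pvIndexRow_contains, pvIndexRow_getD]
    by_cases hsw : d.contains sw
    · simp [hsw]
    · simp only [hsw, Bool.false_or]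
      by_cases hmem : sw ∈ rows
      · have h1 : pvInnerA sw i 0 rows ≠ "" := by
          rw [Ne, pvInnerA_eq_empty_iff]; simp [hmem]
        simp [pvOuterA, hmem, h1]
      · have h1 : pvInnerA sw i 0 rows = "" := by
          rw [pvInnerA_eq_empty_iff]; exact hmem
        simp [pvOuterA, hmem, h1]

-- ===== VERDICT (by name: the statement is the Claim_ definition above) =====
theorem search_data_cell_spec : Claim_equal_search_data_cell := by
  intro sw data _
  unfold Spec_search_data_cell search_data_cell search_data_cell_alt
  rw [pvIndexAll_getD]
  simp
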